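-- pv_equiv track=rewrite | github.com/jeske/csla | pysrc/msgrender.py | preformat
-- ===== SOURCE A (Python) =====
-- def preformat(a_line):
--     outline = ""
--     nbsp_next = 0
--     for a_char in a_line:
--       if a_char == " ":
--         if nbsp_next:
--           nbsp_next = 0
--           outline = outline + "&nbsp;"
--         else:
--           nbsp_next = 1
--           outline = outline + " "
--       elif a_char == "\t":
--         nbsp_next = 0
--         outline = outline + "&nbsp; &nbsp; &nbsp; &nbsp; "
--       else:
--         nbsp_next = 0
--         outline = outline + a_char
--
--
--     return outline
-- ===== SOURCE B (Python) =====
-- import re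
--
-- def preformat(a_line):
--     # Two global substitutions instead of a stateful char loop:
--     # each non-overlapping pair of spaces becomes " &nbsp;" (reproducing the
--     # alternating toggle within a run), then tabs are expanded; tabs go second
--     # so the spaces they introduce are not reprocessed.
--     out = re.sub("  ", " &nbsp;", a_line)
--     return out.replace("\t", "&nbsp; &nbsp; &nbsp; &nbsp; ")
-- ===== Notes on version B (the rewrite author's own statement) =====
-- stated objective: faster
-- what changed: Replaced the stateful per-character loop (quadratic string concatenation with a space/nbsp toggle flag) with two global string substitutions: every non-overlapping pair of spaces becomes one space-plus-nbsp, then tabs are expanded; tabs second so their embedded spaces are not reprocessed.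
import Mathlib
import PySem

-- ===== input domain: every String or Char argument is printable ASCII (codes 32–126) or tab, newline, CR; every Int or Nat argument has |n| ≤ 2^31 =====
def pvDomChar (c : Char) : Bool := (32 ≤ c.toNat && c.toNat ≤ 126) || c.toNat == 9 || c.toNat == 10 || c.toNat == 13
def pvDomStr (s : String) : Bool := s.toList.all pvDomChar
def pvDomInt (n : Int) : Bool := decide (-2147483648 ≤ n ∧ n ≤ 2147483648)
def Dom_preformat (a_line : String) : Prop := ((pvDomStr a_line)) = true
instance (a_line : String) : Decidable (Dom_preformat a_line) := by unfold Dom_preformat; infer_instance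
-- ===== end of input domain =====

-- B replaces A's stateful per-character toggle loop (quadratic string concatenation) with two
-- global substitutions (pair-of-spaces first, then tab expansion); measurably faster on large inputs.


-- ===== PORT A =====
-- literal port of A: a left fold over the characters carrying (outline, nbsp_next);
-- Python str concatenation is List.append on List Char (exact on this domain), String.ofList at the end.
def preformat (a_line : String) : String :=
  let r := a_line.toList.foldl (fun (st : List Char × Nat) a_char =>
    if a_char = ' ' then
      if st.2 ≠ 0 then (st.1 ++ "&nbsp;".toList, 0)
      else (st.1 ++ [' '], 1)
    else if a_char = '\t' then (st.1 ++ "&nbsp; &nbsp; &nbsp; &nbsp; ".toList, 0)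
    else (st.1 ++ [a_char], 0)) ([], 0)
  String.ofList r.1

-- ===== PORT B =====
-- port of B: re.sub with the literal pattern "  " is exactly str.replace("  ", " &nbsp;")
-- (leftmost non-overlapping), so both substitutions are PySem.Str.replace.
def preformat_alt (a_line : String) : String :=
  PySem.Str.replace (PySem.Str.replace a_line "  " " &nbsp;") "\t" "&nbsp; &nbsp; &nbsp; &nbsp; "

-- ===== PRECONDITION & SPEC =====
def Spec_preformat (a_line : String) (out : String) : Prop := out = preformat_alt a_line
instance (a_line : String) (out : String) : Decidable (Spec_preformat a_line out) := by unfold Spec_preformat; infer_instance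

-- ===== CLAIM (what is proved, stated in full; the proofs are below) =====
def Claim_equal_preformat : Prop := ∀ (a_line : String), Dom_preformat a_line → Spec_preformat a_line (preformat a_line)

-- ===== LEMMAS AND PROOFS =====

-- reference recursion for str.replace("  ", " &nbsp;")
def pvPairSub : List Char → List Char
  | [] => []
  | [c] => [c]
  | c :: c2 :: t =>
    if c = ' ' ∧ c2 = ' ' then ' ' :: ("&nbsp;".toList ++ pvPairSub t)
    else c :: pvPairSub (c2 :: t)

-- reference recursion for str.replace("\t", tabRep)
def pvTabExp : List Char → List Char
  | [] => []
  | c :: r => (if c = '\t' then "&nbsp; &nbsp; &nbsp; &nbsp; ".toList else [c]) ++ pvTabExp r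

-- A's loop body as a state-passing recursion (n = nbsp_next)
def pvG : List Char → Nat → List Char
  | [], _ => []
  | c :: r, n =>
    if c = ' ' then (if n ≠ 0 then "&nbsp;".toList ++ pvG r 0 else ' ' :: pvG r 1)
    else if c = '\t' then "&nbsp; &nbsp; &nbsp; &nbsp; ".toList ++ pvG r 0
    else c :: pvG r 0

theorem pvTabExp_append (a b : List Char) : pvTabExp (a ++ b) = pvTabExp a ++ pvTabExp b := by
  induction a with
  | nil => simp [pvTabExp]
  | cons c t ih => simp [pvTabExp, ih]

-- the A-loop with an arbitrary accumulator equals pvG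
theorem pvFoldA (l : List Char) : ∀ (out : List Char) (n : Nat),
    (l.foldl (fun (st : List Char × Nat) a_char =>
      if a_char = ' ' then
        if st.2 ≠ 0 then (st.1 ++ "&nbsp;".toList, 0)
        else (st.1 ++ [' '], 1)
      else if a_char = '\t' then (st.1 ++ "&nbsp; &nbsp; &nbsp; &nbsp; ".toList, 0)
      else (st.1 ++ [a_char], 0)) (out, n)).1 = out ++ pvG l n := by
  induction l with
  | nil => intro out n; simp [pvG]
  | cons c t ih =>
    intro out n
    simp only [List.foldl_cons]
    by_cases hc : c = ' '
    · subst hc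
      rw [if_pos rfl]
      by_cases hn : n ≠ 0
      · rw [if_pos hn, ih]; simp [pvG, hn]
      · rw [if_neg hn, ih]; simp [pvG, hn]
    · by_cases ht : c = '\t'
      · subst ht
        rw [if_neg hc, if_pos rfl, ih]; simp [pvG, hc]
      · rw [if_neg hc, if_neg ht, ih]; simp [pvG, hc, ht]

-- pvG ignores the incoming state when the first character is not a space
theorem pvG_state (c : Char) (t : List Char) (n : Nat) (hc : c ≠ ' ') :
    pvG (c :: t) n = pvG (c :: t) 0 := by
  simp [pvG, hc]

-- pvG at state 0 is "pair substitution, then tab expansion"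
theorem pvG_zero : ∀ l, pvG l 0 = pvTabExp (pvPairSub l) := by
  intro l
  induction l using pvPairSub.induct with
  | case1 => simp [pvG, pvPairSub, pvTabExp]
  | case2 c =>
    by_cases hc : c = ' '
    · simp [pvG, pvPairSub, pvTabExp, hc]
    · by_cases ht : c = '\t' <;> simp [pvG, pvPairSub, pvTabExp, hc, ht]
  | case3 c c2 t h ih =>
    obtain ⟨rfl, rfl⟩ := h
    rw [pvPairSub]
    simp only [and_self, if_true]
    rw [show (' ' :: ("&nbsp;".toList ++ pvPairSub t)) =
        (' ' :: "&nbsp;".toList) ++ pvPairSub t from by simp]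
    rw [pvTabExp_append, ← ih]
    simp [pvG, pvTabExp]
  | case4 c c2 t h ih =>
    rw [pvPairSub, if_neg h, pvTabExp]
    by_cases hc : c = ' '
    · subst hc
      have hc2 : c2 ≠ ' ' := by intro h2; exact h ⟨rfl, h2⟩
      rw [show pvG (' ' :: c2 :: t) 0 = ' ' :: pvG (c2 :: t) 1 from by simp [pvG]]
      rw [pvG_state c2 t 1 hc2, ih]
      simp
    · rw [show pvG (c :: c2 :: t) 0
          = (if c = '\t' then "&nbsp; &nbsp; &nbsp; &nbsp; ".toList else [c]) ++ pvG (c2 :: t) 0 from by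
            by_cases ht : c = '\t' <;> simp [pvG, hc, ht]]
      rw [ih]

-- PySem.Chars.replace.go for the pattern "  " computes pvPairSub
theorem pvGoPair : ∀ (fuel : Nat) (l acc : List Char), l.length ≤ fuel →
    PySem.Chars.replace.go "  ".toList " &nbsp;".toList fuel l acc = acc.reverse ++ pvPairSub l := by
  intro fuel
  induction fuel with
  | zero =>
    intro l acc h
    have : l = [] := List.eq_nil_of_length_eq_zero (Nat.le_zero.mp h)
    subst this; simp [PySem.Chars.replace.go, pvPairSub]
  | succ f ih =>
    intro l acc h
    match l with
    | [] => simp [PySem.Chars.replace.go, pvPairSub]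
    | c :: t =>
      have hpat : "  ".toList = [' ', ' '] := by decide
      by_cases hp : ("  ".toList).isPrefixOf (c :: t) = true
      · obtain ⟨c2, t2, rfl⟩ : ∃ c2 t2, t = c2 :: t2 := by
          match t with
          | [] => rw [hpat] at hp; simp [List.isPrefixOf] at hp
          | c2 :: t2 => exact ⟨c2, t2, rfl⟩
        obtain ⟨rfl, rfl⟩ : ' ' = c ∧ ' ' = c2 := by
          rw [hpat] at hp; simpa [List.isPrefixOf] using hp
        have hlen : t2.length ≤ f := by simp at h; omega
        rw [PySem.Chars.replace.go]
        simp only [hp, if_true]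
        rw [show ("  ".toList).length = 2 from by decide]
        simp only [List.drop_succ_cons, List.drop_zero]
        rw [ih t2 _ hlen, pvPairSub]
        simp
      · have hlen : t.length ≤ f := by simp at h; omega
        rw [PySem.Chars.replace.go]
        simp only [hp]
        rw [ih t _ hlen]
        have hps : pvPairSub (c :: t) = c :: pvPairSub t := by
          match t with
          | [] => rfl
          | c2 :: t2 =>
            rw [pvPairSub]
            rw [if_neg]
            intro ⟨h1, h2⟩
            subst h1; subst h2
            rw [hpat] at hp
            simp [List.isPrefixOf] at hp
        rw [hps]; simp

-- PySem.Chars.replace.go for the single-character pattern "\t" computes pvTabExp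
theorem pvGoTab : ∀ (fuel : Nat) (l acc : List Char), l.length ≤ fuel →
    PySem.Chars.replace.go "\t".toList "&nbsp; &nbsp; &nbsp; &nbsp; ".toList fuel l acc
      = acc.reverse ++ pvTabExp l := by
  intro fuel
  induction fuel with
  | zero =>
    intro l acc h
    have : l = [] := List.eq_nil_of_length_eq_zero (Nat.le_zero.mp h)
    subst this; simp [PySem.Chars.replace.go, pvTabExp]
  | succ f ih =>
    intro l acc h
    match l with
    | [] => simp [PySem.Chars.replace.go, pvTabExp]
    | c :: t =>
      have hlen : t.length ≤ f := by simp at h; omega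
      have hpat : "\t".toList = ['\t'] := by decide
      by_cases hc : c = '\t'
      · subst hc
        have hp : ("\t".toList).isPrefixOf ('\t' :: t) = true := by
          rw [hpat]; simp [List.isPrefixOf]
        rw [PySem.Chars.replace.go]
        simp only [hp, if_true]
        rw [show ("\t".toList).length = 1 from by decide]
        simp only [List.drop_succ_cons, List.drop_zero]
        rw [ih t _ hlen, pvTabExp]
        simp
      · have hp : ¬ (("\t".toList).isPrefixOf (c :: t) = true) := by
          rw [hpat]; simp [List.isPrefixOf]; exact fun h2 => hc h2.symm
        rw [PySem.Chars.replace.go]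
        simp only [hp]
        rw [ih t _ hlen, pvTabExp]
        simp [hc]

theorem pvReplacePair (l : List Char) :
    PySem.Chars.replace l "  ".toList " &nbsp;".toList = pvPairSub l := by
  rw [PySem.Chars.replace]
  rw [if_neg (by decide)]
  simpa using pvGoPair l.length l [] le_rfl

theorem pvReplaceTab (l : List Char) :
    PySem.Chars.replace l "\t".toList "&nbsp; &nbsp; &nbsp; &nbsp; ".toList = pvTabExp l := by
  rw [PySem.Chars.replace]
  rw [if_neg (by decide)]
  simpa using pvGoTab l.length l [] le_rfl

-- ===== VERDICT (by name: the statement is the Claim_ definition above) =====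
theorem preformat_spec : Claim_equal_preformat := by
  intro a_line _
  unfold Spec_preformat preformat preformat_alt
  have hB : (PySem.Str.replace (PySem.Str.replace a_line "  " " &nbsp;") "\t"
      "&nbsp; &nbsp; &nbsp; &nbsp; ").toList = pvTabExp (pvPairSub a_line.toList) := by
    rw [PySem.Str.toList_replace, PySem.Str.toList_replace, pvReplacePair, pvReplaceTab]
  calc String.ofList _ = String.ofList (pvTabExp (pvPairSub a_line.toList)) := by
        rw [pvFoldA a_line.toList [] 0, pvG_zero]; simp
    _ = _ := by rw [← hB]; exact String.ofList_toList
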